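-- pv_equiv track=rewrite | github.com/nhiratani/IBL_variability | data_loading.py | classify_acronym
-- ===== SOURCE A (Python) =====
-- def classify_acronym(acronym, region_group='cortical'):
-- 	acronym_list_cortical = ['FRP', 'ACAd', 'ACAv', 'PL', 'ILA', 'ORBl', 'ORBm', 'ORBvl',
-- 							'AId', 'AIv', 'AIp', 'GU', 'VISC', 'TEa', 'PERI', 'ECT',
-- 							'SSs', 'SSp', 'MOs', 'MOp',
-- 							'VISal', 'VISli', 'VISpl', 'VISpor', 'VISrl',
-- 							'VISam', 'VISpm', 'RSPagl', 'RSPd', 'RSPv',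
-- 							'VISp', 'VISl', 'VISa',
-- 							'AUDd', 'AUDpo', 'AUDp', 'AUDv',
-- 							'ENTl', 'ENTm']
--
--
-- 	# full list of Hippocampus + Subiculum + Striatum + Thalamus + Mid-brain
-- 	acronym_list_subcortical = ['DG', 'CA1', 'CA2', 'CA3', #Hippocanoys
-- 						'PAR', 'POST', 'PRE', 'SUB', 'ProS', # Subiculum
-- 						'CLA', 'LA', 'BLAa', 'BLAp', 'BLAv', 'BMAa', 'BMAp', # Cortical subplate
-- 						'CP', 'ACB', 'FS', 'OT', 'LSc', 'LSr', 'LSv', # Striatum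
-- 						'AAA', 'BA', 'CEAc', 'CEAl', 'CEAm', 'IA', 'MEA', # Striatum
-- 						'VAL', 'VM', 'VPLpc', 'VPL', 'VPMpc', 'VPM', 'PoT', # thalamus (sensory-motor)
-- 						'SPFm', 'SPFp', 'SPA', 'PP', 'MGd', 'MGv', 'MGm', 'LGd-sh', 'LGd-co', 'LGd-ip', # thalamus  (sensory-motor)
-- 						'LP', 'POL', 'PO', 'SGN', 'Eth', #thalamus (associative)
-- 						'AV', 'AMd', 'AMv', 'AD', 'IAM', 'IAD', 'LD', #thalamus (associative)
-- 						'IMD', 'MD', 'SMT', 'PR', #thalamus (associative)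
-- 						'PVT', 'PT', 'RE', 'Xi', #thalamus (associative)
-- 						'RH', 'CM', 'PCN', 'CL', 'PF', 'PIL', 'RT', #thalamus (associative)
-- 						'IGL', 'IngG', 'LGv', 'SubG', 'MH', 'LH', #thalamus (associative)
-- 						'SCop', 'SCsg', 'SCzo', 'ICc', 'ICd', 'ICe', # mid-brain (sensory related)
-- 						'NB', 'SAG', 'PBG', 'MEV', 'SCO',  # mid-brain (sensory related)
-- 						'SNr', 'VTA', 'PN', 'RR', 'MRN', 'SCdg', 'SCdw', 'SCiw', 'SCig', # mid-brain (motor-related)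
-- 						'PRC', 'INC', 'ND', 'Su3', # mid-brain (motor-related)
-- 						'APN', 'MPT', 'NOT', 'NPC', 'OP', 'PPT', 'RPF', # mid-brain (motor-related)
-- 						'CUN', 'RN', 'III', 'MA3', 'EW', 'IV', 'Pa4', 'VTN', 'AT', 'LT', 'DT', 'MT', # mid-brain (motor-related)
-- 						'SNc', 'PPN', 'IF', 'IPN', 'RL', 'CLI', 'DR' # mid-brain (behavioral state related)
-- 						]
-- 						#
--
-- 	for aidx, aname in enumerate(acronym_list_cortical):
-- 		if acronym.startswith(aname):
-- 			return aname
--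
-- 	if region_group == 'all':
-- 		for aidx, aname in enumerate(acronym_list_subcortical):
-- 			if acronym == aname:
-- 				return aname
--
-- 	return None
-- ===== SOURCE B (Python) =====
-- def classify_acronym(acronym, region_group='cortical'):
-- 	# same data, stored as whitespace-separated tables; cortical match = longest matching prefix
-- 	cortical = ('FRP ACAd ACAv PL ILA ORBl ORBm ORBvl AId AIv AIp GU VISC TEa PERI ECT '
-- 				'SSs SSp MOs MOp VISal VISli VISpl VISpor VISrl VISam VISpm RSPagl RSPd RSPv '
-- 				'VISp VISl VISa AUDd AUDpo AUDp AUDv ENTl ENTm').split()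
--
-- 	subcortical = frozenset(('DG CA1 CA2 CA3 PAR POST PRE SUB ProS CLA LA BLAa BLAp BLAv BMAa BMAp '
-- 				'CP ACB FS OT LSc LSr LSv AAA BA CEAc CEAl CEAm IA MEA '
-- 				'VAL VM VPLpc VPL VPMpc VPM PoT SPFm SPFp SPA PP MGd MGv MGm LGd-sh LGd-co LGd-ip '
-- 				'LP POL PO SGN Eth AV AMd AMv AD IAM IAD LD IMD MD SMT PR PVT PT RE Xi '
-- 				'RH CM PCN CL PF PIL RT IGL IngG LGv SubG MH LH '
-- 				'SCop SCsg SCzo ICc ICd ICe NB SAG PBG MEV SCO '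
-- 				'SNr VTA PN RR MRN SCdg SCdw SCiw SCig PRC INC ND Su3 '
-- 				'APN MPT NOT NPC OP PPT RPF CUN RN III MA3 EW IV Pa4 VTN AT LT DT MT '
-- 				'SNc PPN IF IPN RL CLI DR').split())
--
-- 	best = max((a for a in cortical if acronym.startswith(a)), key=len, default=None)
-- 	if best is None and region_group == 'all' and acronym in subcortical:
-- 		return acronym
-- 	return best
-- ===== Notes on version B (the rewrite author's own statement) =====
-- stated objective: alternative
-- what changed: B stores the region tables as whitespace-separated strings split at run time, replaces A's ordered first-match cortical loop by collecting all matching prefixes and taking the longest with max(key=len, default=None) (equal because no earlier cortical entry is a prefix of a later one), and replaces the subcortical exact-match loop by a frozenset membership test returning the acronym itself.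
import Mathlib
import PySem

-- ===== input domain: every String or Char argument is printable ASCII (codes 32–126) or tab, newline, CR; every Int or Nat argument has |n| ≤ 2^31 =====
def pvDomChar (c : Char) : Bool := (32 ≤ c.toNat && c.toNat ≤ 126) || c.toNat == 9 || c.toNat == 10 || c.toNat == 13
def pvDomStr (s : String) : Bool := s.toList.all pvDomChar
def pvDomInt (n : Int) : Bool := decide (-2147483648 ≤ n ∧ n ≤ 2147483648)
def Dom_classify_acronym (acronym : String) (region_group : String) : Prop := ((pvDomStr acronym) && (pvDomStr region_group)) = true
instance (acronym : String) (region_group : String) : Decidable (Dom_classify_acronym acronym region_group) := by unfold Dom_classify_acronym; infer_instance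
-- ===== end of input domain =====

-- B stores the tables as whitespace-separated strings split at run time, replaces A's ordered
-- first-match cortical loop by collect-all-prefixes + max-by-length, and the subcortical equality
-- loop by a set membership test; objective: alternative decomposition, same cost.

-- ===== PORT A =====
-- A's literal Python lists
def aListCortical : List String := ["FRP", "ACAd", "ACAv", "PL", "ILA", "ORBl", "ORBm", "ORBvl", "AId", "AIv", "AIp", "GU", "VISC", "TEa", "PERI", "ECT", "SSs", "SSp", "MOs", "MOp", "VISal", "VISli", "VISpl", "VISpor", "VISrl", "VISam", "VISpm", "RSPagl", "RSPd", "RSPv", "VISp", "VISl", "VISa", "AUDd", "AUDpo", "AUDp", "AUDv", "ENTl", "ENTm"]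

def aListSubcortical : List String := ["DG", "CA1", "CA2", "CA3", "PAR", "POST", "PRE", "SUB", "ProS", "CLA", "LA", "BLAa", "BLAp", "BLAv", "BMAa", "BMAp", "CP", "ACB", "FS", "OT", "LSc", "LSr", "LSv", "AAA", "BA", "CEAc", "CEAl", "CEAm", "IA", "MEA", "VAL", "VM", "VPLpc", "VPL", "VPMpc", "VPM", "PoT", "SPFm", "SPFp", "SPA", "PP", "MGd", "MGv", "MGm", "LGd-sh", "LGd-co", "LGd-ip", "LP", "POL", "PO", "SGN", "Eth", "AV", "AMd", "AMv", "AD", "IAM", "IAD", "LD", "IMD", "MD", "SMT", "PR", "PVT", "PT", "RE", "Xi", "RH", "CM", "PCN", "CL", "PF", "PIL", "RT", "IGL", "IngG", "LGv", "SubG", "MH", "LH", "SCop", "SCsg", "SCzo", "ICc", "ICd", "ICe", "NB", "SAG", "PBG", "MEV", "SCO", "SNr", "VTA", "PN", "RR", "MRN", "SCdg", "SCdw", "SCiw", "SCig", "PRC", "INC", "ND", "Su3", "APN", "MPT", "NOT", "NPC", "OP", "PPT", "RPF", "CUN", "RN", "III", "MA3", "EW", "IV", "Pa4", "VTN", "AT",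 "LT", "DT", "MT", "SNc", "PPN", "IF", "IPN", "RL", "CLI", "DR"]

-- A's first for-loop with early return: first aname with acronym.startswith(aname)
def aFirstPrefix (acronym : String) : List String → Option String
  | [] => none
  | aname :: rest =>
      if PySem.Str.startswith acronym aname then some aname else aFirstPrefix acronym rest

-- A's second for-loop with early return: first aname with acronym == aname
def aFirstEq (acronym : String) : List String → Option String
  | [] => none
  | aname :: rest =>
      if acronym == aname then some aname else aFirstEq acronym rest

def classify_acronym (acronym : String) (region_group : String) : Option String :=
  match aFirstPrefix acronym aListCortical with
  | some aname => some aname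
  | none =>
      if region_group == "all" then
        match aFirstEq acronym aListSubcortical with
        | some aname => some aname
        | none => none
      else none

-- ===== PORT B =====
-- Source B's tables: whitespace-separated strings, .split() at run time
def bCortical : List String := PySem.Str.split₀ ("FRP ACAd ACAv PL ILA ORBl ORBm ORBvl AId AIv AIp GU VISC TEa PERI ECT " ++
  "SSs SSp MOs MOp VISal VISli VISpl VISpor VISrl VISam VISpm RSPagl RSPd RSPv " ++
  "VISp VISl VISa AUDd AUDpo AUDp AUDv ENTl ENTm")

def bSubSplit : List String := PySem.Str.split₀ ("DG CA1 CA2 CA3 PAR POST PRE SUB ProS CLA LA BLAa BLAp BLAv BMAa BMAp " ++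
  "CP ACB FS OT LSc LSr LSv AAA BA CEAc CEAl CEAm IA MEA " ++
  "VAL VM VPLpc VPL VPMpc VPM PoT SPFm SPFp SPA PP MGd MGv MGm LGd-sh LGd-co LGd-ip " ++
  "LP POL PO SGN Eth AV AMd AMv AD IAM IAD LD IMD MD SMT PR PVT PT RE Xi " ++
  "RH CM PCN CL PF PIL RT IGL IngG LGv SubG MH LH " ++
  "SCop SCsg SCzo ICc ICd ICe NB SAG PBG MEV SCO " ++
  "SNr VTA PN RR MRN SCdg SCdw SCiw SCig PRC INC ND Su3 " ++
  "APN MPT NOT NPC OP PPT RPF CUN RN III MA3 EW IV Pa4 VTN AT LT DT MT " ++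
  "SNc PPN IF IPN RL CLI DR")

def bSubcortical : PySem.Set String := PySem.Set.ofList bSubSplit

def classify_acronym_alt (acronym : String) (region_group : String) : Option String :=
  -- best = max((a for a in cortical if acronym.startswith(a)), key=len, default=None)
  let best := PySem.List.max? (bCortical.filter (fun a => PySem.Str.startswith acronym a))
      (fun a => PySem.Str.len a)
  if best == none && region_group == "all" && PySem.Set.contains bSubcortical acronym
  then some acronym else best

-- ===== PRECONDITION & SPEC =====
def Spec_classify_acronym (acronym : String) (region_group : String) (out : Option String) : Prop := out = classify_acronym_alt acronym region_group
instance (acronym : String) (region_group : String) (out : Option String) : Decidable (Spec_classify_acronym acronym region_group out) := by unfold Spec_classify_acronym; infer_instance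

-- ===== CLAIM (what is proved, stated in full; the proofs are below) =====
def Claim_equal_classify_acronym : Prop := ∀ (acronym : String) (region_group : String), Dom_classify_acronym acronym region_group → Spec_classify_acronym acronym region_group (classify_acronym acronym region_group)

-- ===== LEMMAS AND PROOFS =====

-- B's split-at-run-time tables are A's literal lists
set_option maxRecDepth 400000 in
set_option maxHeartbeats 4000000 in
theorem bCortical_eq : bCortical = aListCortical := by decide

set_option maxRecDepth 400000 in
set_option maxHeartbeats 4000000 in
theorem bSubSplit_eq : bSubSplit = aListSubcortical := by decide

-- no earlier list element is a prefix of a later one (so A's first match is the longest match)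
def NoEarlierPrefix (l : List String) : Prop :=
  List.Pairwise (fun a b => ¬ (a.toList <+: b.toList)) l

theorem noEarlierPrefix_cortical : NoEarlierPrefix aListCortical := by
  unfold NoEarlierPrefix aListCortical; decide

-- Python max(..., key) folds keeping the first maximal element; a strictly dominant head survives
theorem max?_cons_of_lt {α : Type} (key : α → Int) (a : α) (t : List α)
    (h : ∀ m ∈ t, key m < key a) :
    PySem.List.max? (a :: t) key = some a := by
  show List.foldl _ (some a) t = some a
  induction t with
  | nil => rfl
  | cons x xs ih =>
      have hx := h x (List.mem_cons_self ..)
      simp only [List.foldl_cons]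
      rw [show (if key a < key x then some x else some a) = some a by
        simp [not_lt.mpr (le_of_lt hx)]]
      exact ih (fun m hm => h m (List.mem_cons_of_mem _ hm))

theorem firstPrefix_eq_max (s : String) (l : List String) (hC : NoEarlierPrefix l) :
    aFirstPrefix s l =
      PySem.List.max? (l.filter (fun a => PySem.Str.startswith s a)) (fun a => PySem.Str.len a) := by
  induction l with
  | nil => rfl
  | cons a rest ih =>
      rcases List.pairwise_cons.mp hC with ⟨ha, hrest⟩
      by_cases hs : PySem.Str.startswith s a = true
      · simp only [aFirstPrefix, hs, if_pos, List.filter_cons]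
        rw [max?_cons_of_lt]
        intro m hm
        rcases List.mem_filter.mp hm with ⟨hmem, hms⟩
        have hma : m.toList <+: s.toList := (PySem.Chars.startswith_iff _ _).mp (by
          simpa [PySem.Str.startswith_eq] using hms)
        have haa : a.toList <+: s.toList := (PySem.Chars.startswith_iff _ _).mp (by
          simpa [PySem.Str.startswith_eq] using hs)
        have hnot : ¬ (a.toList <+: m.toList) := ha m hmem
        have hpre : m.toList <+: a.toList := by
          rcases List.prefix_or_prefix_of_prefix hma haa with h | h
          · exact h
          · exact absurd h hnot
        have hne : m.toList ≠ a.toList := by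
          intro he; exact hnot (he ▸ List.prefix_refl _)
        have hlt : m.toList.length < a.toList.length := by
          rcases lt_or_eq_of_le (List.IsPrefix.length_le hpre) with h | h
          · exact h
          · exact absurd (List.IsPrefix.eq_of_length hpre h) hne
        simp only [PySem.Str.len_eq]
        exact_mod_cast hlt
      · simp only [aFirstPrefix, hs, List.filter_cons, Bool.false_eq_true,
          if_false]
        exact ih hrest

theorem firstEq_eq_mem (s : String) (l : List String) :
    aFirstEq s l = if l.contains s then some s else none := by
  induction l with
  | nil => rfl
  | cons a rest ih =>
      by_cases h : s = a
      · subst h; simp [aFirstEq]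
      · simp [aFirstEq, h, ih]

-- ===== VERDICT (by name: the statement is the Claim_ definition above) =====
theorem classify_acronym_spec : Claim_equal_classify_acronym := by
  intro acronym region_group _
  unfold Spec_classify_acronym classify_acronym classify_acronym_alt bSubcortical
  rw [bCortical_eq, bSubSplit_eq,
    ← firstPrefix_eq_max acronym aListCortical noEarlierPrefix_cortical]
  cases hp : aFirstPrefix acronym aListCortical with
  | some a => simp
  | none =>
      rw [firstEq_eq_mem]
      have hmem : PySem.Set.contains (PySem.Set.ofList aListSubcortical) acronym
          = decide (acronym ∈ aListSubcortical) := by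
        simp [PySem.Set.contains, PySem.Set.mem_ofList]
      simp only [hmem]
      by_cases hg : region_group = "all"
      · subst hg
        by_cases hm : acronym ∈ aListSubcortical <;> simp [hm, List.contains_eq_mem]
      · have hg' : (region_group == "all") = false := by simpa using hg
        simp [hg']
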